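-- pv_equiv track=rewrite | github.com/stevenengland/sten-agent-skills | plugins/stenswr/skills/test-file-refactor/scripts/analyze_tests.py | _classify_target
-- ===== SOURCE A (Python) =====
-- def _classify_target(target: str, project_pkg: str | None, boundary_allowlist: set[str]) -> str:
--     """Return one of 'internal', 'boundary', 'unknown' for a patch target string."""
--     if not target:
--         return "unknown"
--     root = target.split(".", 1)[0]
--     for boundary in boundary_allowlist:
--         if target == boundary or target.startswith(boundary + "."):
--             return "boundary"
--         if root == boundary:
--             return "boundary"
--     if project_pkg and (target == project_pkg or target.startswith(project_pkg + ".")):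
--         return "internal"
--     return "unknown"
-- ===== SOURCE B (Python) =====
-- def _classify_target(target: str, project_pkg: str | None, boundary_allowlist: set[str]) -> str:
--     """Return one of 'internal', 'boundary', 'unknown' for a patch target string."""
--     if not target:
--         return "unknown"
--     prefixes = {target[:i] for i, ch in enumerate(target) if ch == "."}
--     prefixes.add(target)
--     if not prefixes.isdisjoint(boundary_allowlist):
--         return "boundary"
--     if project_pkg and project_pkg in prefixes:
--         return "internal"
--     return "unknown"
-- ===== Notes on version B (the rewrite author's own statement) =====
-- stated objective: alternative
-- what changed: A scans every allowlist entry testing equality/startswith against the target; B builds the set of dotted prefixes of the target once and answers by set membership, so the allowlist is never iterated.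
import Mathlib
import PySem

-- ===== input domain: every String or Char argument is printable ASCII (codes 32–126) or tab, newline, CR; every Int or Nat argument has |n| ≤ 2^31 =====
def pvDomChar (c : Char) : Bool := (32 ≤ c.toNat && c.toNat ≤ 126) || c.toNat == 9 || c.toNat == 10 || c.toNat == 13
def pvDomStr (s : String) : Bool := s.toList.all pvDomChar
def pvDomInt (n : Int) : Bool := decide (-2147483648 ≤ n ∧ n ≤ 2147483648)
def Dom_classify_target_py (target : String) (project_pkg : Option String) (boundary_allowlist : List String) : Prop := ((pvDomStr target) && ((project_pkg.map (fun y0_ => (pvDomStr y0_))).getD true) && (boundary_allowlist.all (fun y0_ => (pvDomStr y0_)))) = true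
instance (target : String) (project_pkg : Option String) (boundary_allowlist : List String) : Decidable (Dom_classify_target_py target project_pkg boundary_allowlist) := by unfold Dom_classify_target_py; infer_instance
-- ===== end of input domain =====

-- B replaces A's per-entry scan of the allowlist by a one-off set of the dotted prefixes of
-- `target`, probed by set membership; equal return value on every input (both are pure).

-- ===== PORT A =====
-- A's for-loop over the allowlist, with its two early 'return "boundary"' branches
def pvALoop (tc root : List Char) : List (List Char) → Option String
  | [] => none
  | b :: rest =>
    if tc == b || PySem.Chars.startswith tc (b ++ ['.']) then some "boundary"
    else if root == b then some "boundary"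
    else pvALoop tc root rest

def classify_target_py (target : String) (project_pkg : Option String) (boundary_allowlist : List String) : String :=
  let tc := target.toList
  if tc = [] then "unknown"
  else
    -- root = target.split(".", 1)[0]; the split result is never empty, so [0] is its head
    let root := (PySem.Chars.splitOnMax tc ['.'] 1).headD []
    match pvALoop tc root (boundary_allowlist.map String.toList) with
    | some r => r
    | none =>
      match project_pkg with
      | some p =>
        if p.toList ≠ [] ∧ (tc == p.toList || PySem.Chars.startswith tc (p.toList ++ ['.'])) then "internal"
        else "unknown"
      | none => "unknown"

-- ===== PORT B =====
-- {target[:i] for i, ch in enumerate(target) if ch == "."}, then prefixes.add(target)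
def pvPrefixes (tc : List Char) : PySem.Set (List Char) :=
  PySem.Set.add
    (PySem.Set.ofList
      (((PySem.List.enumerate tc).filter (fun p => p.2 == '.')).map
        (fun p => PySem.List.slice tc none (some p.1))))
    tc

def classify_target_py_alt (target : String) (project_pkg : Option String) (boundary_allowlist : List String) : String :=
  let tc := target.toList
  if tc = [] then "unknown"
  else
    let prefixes := pvPrefixes tc
    if !(PySem.Set.isdisjoint prefixes (boundary_allowlist.map String.toList)) then "boundary"
    else
      match project_pkg with
      | some p =>
        if p.toList ≠ [] ∧ prefixes.contains p.toList then "internal" else "unknown"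
      | none => "unknown"

-- ===== PRECONDITION & SPEC =====
def Spec_classify_target_py (target : String) (project_pkg : Option String) (boundary_allowlist : List String) (out : String) : Prop := out = classify_target_py_alt target project_pkg boundary_allowlist
instance (target : String) (project_pkg : Option String) (boundary_allowlist : List String) (out : String) : Decidable (Spec_classify_target_py target project_pkg boundary_allowlist out) := by unfold Spec_classify_target_py; infer_instance

-- ===== CLAIM (what is proved, stated in full; the proofs are below) =====
def Claim_equal_classify_target_py : Prop := ∀ (target : String) (project_pkg : Option String) (boundary_allowlist : List String), Dom_classify_target_py target project_pkg boundary_allowlist → Spec_classify_target_py target project_pkg boundary_allowlist (classify_target_py target project_pkg boundary_allowlist)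

-- ===== LEMMAS AND PROOFS =====

-- b followed by a dot is a prefix of tc  ↔  tc has a '.' at position k and b = tc.take k
theorem pv_prefix_dot_iff (tc b : List Char) :
    (b ++ ['.']) <+: tc ↔ ∃ k, ∃ h : k < tc.length, tc[k] = '.' ∧ b = tc.take k := by
  constructor
  · rintro ⟨r, hr⟩
    refine ⟨b.length, ?_, ?_, ?_⟩
    · subst hr; simp
    · subst hr; simp
    · subst hr; simp
  · rintro ⟨k, h, hdot, rfl⟩
    refine ⟨tc.drop (k+1), ?_⟩
    rw [List.append_assoc]
    have h2 : tc[k] :: tc.drop (k+1) = tc.drop k := (List.getElem_cons_drop h)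
    simp only [List.singleton_append, hdot] at h2 ⊢
    rw [h2]
    exact List.take_append_drop k tc

-- membership in B's prefix set
theorem pv_mem_prefixes_iff (tc b : List Char) :
    b ∈ pvPrefixes tc ↔ tc = b ∨ (b ++ ['.']) <+: tc := by
  rw [pv_prefix_dot_iff]
  unfold pvPrefixes
  rw [PySem.Set.mem_add, PySem.Set.mem_ofList]
  simp only [List.mem_map, List.mem_filter, PySem.List.mem_enumerate_iff]
  constructor
  · rintro (⟨p, ⟨⟨k, hk, rfl⟩, hdot⟩, rfl⟩ | rfl)
    · right
      simp only [beq_iff_eq] at hdot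
      refine ⟨k, hk, hdot, ?_⟩
      rw [show ((0:Int) + (k:Int)) = ((k:Nat):Int) by omega, PySem.List.slice_to_natCast]
    · left; rfl
  · rintro (rfl | ⟨k, hk, hdot, rfl⟩)
    · right; rfl
    · left
      refine ⟨((0:Int)+(k:Int), tc[k]), ⟨⟨k, hk, rfl⟩, by simp [hdot]⟩, ?_⟩
      rw [show ((0:Int) + (k:Int)) = ((k:Nat):Int) by omega, PySem.List.slice_to_natCast]

-- the maximal dot-free prefix of tc is tc itself or stops exactly at a '.' of tc
theorem pv_takeWhile_cases (tc : List Char) :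
    tc.takeWhile (· != '.') = tc ∨
      ∃ k, ∃ h : k < tc.length, tc[k] = '.' ∧ tc.takeWhile (· != '.') = tc.take k := by
  induction tc with
  | nil => left; rfl
  | cons c rest ih =>
    by_cases hc : c = '.'
    · right
      exact ⟨0, by simp, by simp [hc], by simp [hc]⟩
    · rcases ih with h | ⟨k, hk, hdot, heq⟩
      · left; simp [hc, h]
      · right
        exact ⟨k+1, by simpa using hk, by simpa using hdot, by simp [hc, heq]⟩

-- splitOnMax.go with maxsplit budget 0 yields the accumulated first piece as its head
theorem pv_go_after_dot (fuel : Nat) (l : List Char) (x : List Char) :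
    (PySem.Chars.splitOnMax.go ['.'] fuel 0 l [] [x]).head?.getD [] = x := by
  cases fuel <;> cases l <;> simp [PySem.Chars.splitOnMax.go]

-- the head of split(".", 1) is the maximal dot-free prefix
theorem pv_go_head (l : List Char) : ∀ (fuel : Nat) (cur : List Char), l.length ≤ fuel →
    (PySem.Chars.splitOnMax.go ['.'] fuel 1 l cur []).headD [] = cur.reverse ++ l.takeWhile (· != '.') := by
  induction l with
  | nil => intro fuel cur _; cases fuel <;> simp [PySem.Chars.splitOnMax.go]
  | cons c rest ih =>
    intro fuel cur hf
    cases fuel with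
    | zero => simp at hf
    | succ f =>
      by_cases hc : c = '.'
      · simp only [PySem.Chars.splitOnMax.go, hc, List.isPrefixOf, List.headD_eq_head?_getD]
        simp [pv_go_after_dot]
      · have : PySem.Chars.splitOnMax.go ['.'] (f+1) 1 (c::rest) cur [] =
            PySem.Chars.splitOnMax.go ['.'] f 1 rest (c::cur) [] := by
          simp only [PySem.Chars.splitOnMax.go, List.isPrefixOf]
          simp [Ne.symm hc]
        rw [this, ih f (c::cur) (by simpa using hf)]
        simp [hc]

-- characterisation of A's root = target.split(".", 1)[0]
theorem pv_root_eq (tc : List Char) :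
    (PySem.Chars.splitOnMax tc ['.'] 1).headD [] = tc.takeWhile (· != '.') := by
  unfold PySem.Chars.splitOnMax
  norm_num
  rw [← List.headD_eq_head?_getD, pv_go_head tc (tc.length+1) [] (by omega)]
  simp

-- A's per-element loop test agrees with membership in B's prefix set
theorem pv_cond_iff (tc b : List Char) :
    (tc == b || PySem.Chars.startswith tc (b ++ ['.']) || (tc.takeWhile (· != '.')) == b) = true
      ↔ b ∈ pvPrefixes tc := by
  rw [pv_mem_prefixes_iff]
  simp only [Bool.or_eq_true, beq_iff_eq, PySem.Chars.startswith_iff]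
  constructor
  · rintro ((rfl | h) | rfl)
    · left; rfl
    · right; exact h
    · rcases pv_takeWhile_cases tc with h | ⟨k, hk, hdot, heq⟩
      · left; exact h.symm
      · right; rw [pv_prefix_dot_iff]; exact ⟨k, hk, hdot, heq⟩
  · rintro (rfl | h)
    · left; left; rfl
    · left; right; exact h

-- A's loop returns "boundary" exactly when some allowlist entry is in B's prefix set
theorem pv_loop_eq (tc : List Char) (allow : List (List Char)) :
    pvALoop tc (tc.takeWhile (· != '.')) allow
      = if allow.any (fun b => pvPrefixes tc |>.contains b) then some "boundary" else none := by
  induction allow with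
  | nil => simp [pvALoop]
  | cons b rest ih =>
    simp only [pvALoop, List.any_cons, ih]
    by_cases hb : b ∈ pvPrefixes tc
    · have hc : (tc == b || PySem.Chars.startswith tc (b ++ ['.']) || (tc.takeWhile (· != '.')) == b) = true :=
        (pv_cond_iff tc b).2 hb
      have hb' : (pvPrefixes tc).contains b = true := by
        simp [PySem.Set.contains, hb]
      rcases Bool.or_eq_true_iff.1 hc with h1 | h2
      · simp only [h1, hb', Bool.true_or, if_pos]
      · simp only [h2, hb', Bool.true_or, if_pos]
        rcases Bool.eq_false_or_eq_true (tc == b || PySem.Chars.startswith tc (b ++ ['.'])) with h0 | h0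
        · simp [h0]
        · simp [h0]
    · have hc := (pv_cond_iff tc b)
      have : (tc == b || PySem.Chars.startswith tc (b ++ ['.']) || (tc.takeWhile (· != '.')) == b) = false := by
        rcases Bool.eq_false_or_eq_true (tc == b || PySem.Chars.startswith tc (b ++ ['.']) || (tc.takeWhile (· != '.')) == b) with h | h
        · exact absurd (hc.1 h) hb
        · exact h
      have hb' : (pvPrefixes tc).contains b = false := by
        simp [PySem.Set.contains]
        simpa [List.contains_iff_mem] using hb
      simp only [Bool.or_eq_false_iff] at this
      simp [this.1.1, this.1.2, this.2, hb]

-- "some prefix of tc is in the allowlist" (B) equals "some allowlist entry is a prefix of tc" (A)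
theorem pv_any_swap (s t : List (List Char)) :
    (t.any fun b => PySem.Set.contains s b) = !(PySem.Set.isdisjoint s t) := by
  simp only [PySem.Set.isdisjoint, Bool.not_not]
  rcases Bool.eq_false_or_eq_true (t.any fun b => PySem.Set.contains s b) with h | h <;> rw [h]
  · symm
    rw [List.any_eq_true] at h ⊢
    obtain ⟨b, hb, hc⟩ := h
    simp only [PySem.Set.contains, List.contains_eq_mem, decide_eq_true_eq] at hc
    exact ⟨b, hc, by simp [PySem.Set.contains, List.contains_eq_mem, hb]⟩
  · symm
    rw [List.any_eq_false]
    intro x hx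
    rw [List.any_eq_false] at h
    intro hc
    simp only [PySem.Set.contains, List.contains_eq_mem, decide_eq_true_eq] at hc ⊢
    exact absurd (by simpa [PySem.Set.contains, List.contains_eq_mem] using h x hc) (by simp [hx])

theorem pv_main (target : String) (project_pkg : Option String) (boundary_allowlist : List String) :
    classify_target_py target project_pkg boundary_allowlist = classify_target_py_alt target project_pkg boundary_allowlist := by
  unfold classify_target_py classify_target_py_alt
  by_cases h0 : target.toList = []
  · simp [h0]
  · simp only [h0, if_false]
    rw [pv_root_eq, pv_loop_eq, pv_any_swap]
    rcases Bool.eq_false_or_eq_true (PySem.Set.isdisjoint (pvPrefixes target.toList) (boundary_allowlist.map String.toList)) with hd | hd <;>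
      simp only [hd, Bool.not_false, Bool.not_true, if_true, if_false]
    · cases project_pkg with
      | none => rfl
      | some p =>
        by_cases hp : p.toList = []
        · simp [hp]
        · have : (target.toList == p.toList || PySem.Chars.startswith target.toList (p.toList ++ ['.'])) = (pvPrefixes target.toList).contains p.toList := by
            rcases Bool.eq_false_or_eq_true ((pvPrefixes target.toList).contains p.toList) with hc | hc <;> rw [hc]
            · simp only [PySem.Set.contains, List.contains_eq_mem, decide_eq_true_eq] at hc
              rw [pv_mem_prefixes_iff] at hc
              rcases hc with h | hc
              · simp [h]
              · simp [(PySem.Chars.startswith_iff _ _).2 hc]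
            · rw [Bool.or_eq_false_iff]
              simp only [PySem.Set.contains, List.contains_eq_mem, decide_eq_false_iff_not,
                pv_mem_prefixes_iff] at hc
              push Not at hc
              constructor
              · simp only [beq_eq_false_iff_ne]; exact hc.1
              · rcases Bool.eq_false_or_eq_true (PySem.Chars.startswith target.toList (p.toList ++ ['.'])) with h | h
                · exact absurd ((PySem.Chars.startswith_iff _ _).1 h) hc.2
                · exact h
          simp [this]

-- ===== VERDICT (by name: the statement is the Claim_ definition above) =====
theorem classify_target_py_spec : Claim_equal_classify_target_py := by
  intro target project_pkg boundary_allowlist _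
  unfold Spec_classify_target_py
  exact pv_main target project_pkg boundary_allowlist
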